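-- pv_equiv track=rewrite | github.com/Wytzepakito/hackerRankPython | gaming_array.py | gamingArray2
-- ===== SOURCE A (Python) =====
-- def gamingArray2(arr):
--     arr_copy = arr.copy()
--
--     arr.sort()
--     arr.reverse()
--     steps = 0
--     last_index = len(arr) + 1
--
--     for num in arr:
--         ind = arr_copy.index(num)
--         if ind > 0 and ind < last_index:
--             steps += 1
--             last_index = ind
--         elif ind == 0:
--             steps += 1
--             break
--
--     if steps % 2 == 0:
--         return "ANDY"
--     else:
--         return "BOB"
-- ===== SOURCE B (Python) =====
-- def gamingArray2(arr):
--     # Single left-to-right pass: count strict prefix maxima; BOB wins iff the count is odd.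
--     # (A sorts its argument in place as a side effect; B does not mutate arr. Return values agree.)
--     steps = 0
--     cur = None
--     for x in arr:
--         if cur is None or x > cur:
--             steps += 1
--             cur = x
--     if steps % 2 == 0:
--         return "ANDY"
--     else:
--         return "BOB"
-- ===== Notes on version B (the rewrite author's own statement) =====
-- stated objective: faster
-- what changed: Replaced sort + repeated list.index scans with one left-to-right pass counting strict prefix maxima (running max), whose parity decides the winner.
import Mathlib
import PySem

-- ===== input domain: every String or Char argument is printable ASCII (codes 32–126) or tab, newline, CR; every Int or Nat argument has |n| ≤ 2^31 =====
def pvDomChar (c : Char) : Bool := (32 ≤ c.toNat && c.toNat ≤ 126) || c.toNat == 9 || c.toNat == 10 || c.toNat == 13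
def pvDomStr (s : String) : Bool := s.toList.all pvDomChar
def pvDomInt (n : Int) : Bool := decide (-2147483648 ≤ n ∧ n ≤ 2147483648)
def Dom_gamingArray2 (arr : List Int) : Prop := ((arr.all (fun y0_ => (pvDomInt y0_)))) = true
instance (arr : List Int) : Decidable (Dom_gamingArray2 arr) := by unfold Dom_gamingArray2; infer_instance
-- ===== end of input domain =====

-- B replaces A's sort + repeated list.index scans by one pass counting strict prefix maxima.
-- A sorts its argument list in place (a caller-visible side effect); B does not mutate it; the theorems are about the return value.

-- ===== PORT A =====
-- the 'for num in arr: ind = arr_copy.index(num); …' loop; state (steps, last_index); returns steps.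
-- index() cannot raise here (num is drawn from a permutation of arr_copy); the 'none' arm is unreachable.
def paLoop (orig : List Int) : List Int → Int → Int → Int
  | [], steps, _ => steps
  | num :: rest, steps, lastIndex =>
    match PySem.List.index? orig num with
    | none => steps
    | some ind =>
      if 0 < (ind : Int) ∧ (ind : Int) < lastIndex then
        paLoop orig rest (steps + 1) (ind : Int)
      else if (ind : Int) = 0 then
        steps + 1
      else
        paLoop orig rest steps lastIndex

def gamingArray2 (arr : List Int) : String :=
  let arrCopy := arr
  -- arr.sort(); arr.reverse()
  let arrSorted := (PySem.List.sorted arr (fun x => x) false).reverse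
  let steps := paLoop arrCopy arrSorted 0 ((arr.length : Int) + 1)
  if PySem.Int.mod steps 2 = 0 then "ANDY" else "BOB"

-- ===== PORT B =====
-- one pass: count elements strictly greater than everything before them (running maximum `cur`).
def pbLoop : List Int → Option Int → Int → Int
  | [], _, steps => steps
  | x :: xs, cur, steps =>
    match cur with
    | none => pbLoop xs (some x) (steps + 1)
    | some c => if c < x then pbLoop xs (some x) (steps + 1) else pbLoop xs cur steps

def gamingArray2_alt (arr : List Int) : String :=
  let steps := pbLoop arr none 0
  if PySem.Int.mod steps 2 = 0 then "ANDY" else "BOB"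

-- ===== PRECONDITION & SPEC =====
def Spec_gamingArray2 (arr : List Int) (out : String) : Prop := out = gamingArray2_alt arr
instance (arr : List Int) (out : String) : Decidable (Spec_gamingArray2 arr out) := by unfold Spec_gamingArray2; infer_instance

-- ===== CLAIM (what is proved, stated in full; the proofs are below) =====
def Claim_equal_gamingArray2 : Prop := ∀ (arr : List Int), Dom_gamingArray2 arr → Spec_gamingArray2 arr (gamingArray2 arr)

-- ===== LEMMAS AND PROOFS =====

-- threshold test: `gtO t v` = "v is above the threshold t" (none = no threshold yet)
def gtO : Option Int → Int → Bool
  | none, _ => true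
  | some c, v => decide (c < v)

-- pbLoop with accumulator s returns s + its result from 0
theorem pbLoop_acc (l : List Int) : ∀ (c : Option Int) (s : Int),
    pbLoop l c s = s + pbLoop l c 0 := by
  induction l with
  | nil => intro c s; simp [pbLoop]
  | cons x xs ih =>
    intro c s
    cases c with
    | none => simp only [pbLoop]; rw [ih (some x) (s+1), ih (some x) (0+1)]; ring
    | some c =>
      simp only [pbLoop]
      by_cases h : c < x
      · simp only [if_pos h]; rw [ih (some x) (s+1), ih (some x) (0+1)]; ring
      · simp only [if_neg h]; exact ih (some c) s

-- a run whose last_index has dropped to 1 adds nothing more, provided the head value x never recurs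
theorem paLoop_dead (x : Int) (xs : List Int) : ∀ (vs : List Int) (s : Int),
    (∀ v ∈ vs, v ≠ x) → paLoop (x :: xs) vs s 1 = s := by
  intro vs
  induction vs with
  | nil => intro s _; simp [paLoop]
  | cons v vs ih =>
    intro s h
    have hvx : x ≠ v := fun he => (h v (by simp)) he.symm
    have htail : ∀ w ∈ vs, w ≠ x := fun w hw => h w (by simp [hw])
    simp only [paLoop]
    rw [PySem.List.index?_cons_of_ne xs hvx]
    cases hidx : PySem.List.index? xs v with
    | none => exact rfl
    | some j =>
      simp only [Option.map_some]
      have h1 : ¬ (0 < ((j+1 : Nat) : Int) ∧ ((j+1 : Nat) : Int) < 1) := by omega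
      have h2 : ¬ (((j+1 : Nat) : Int) = 0) := by omega
      rw [if_neg h1, if_neg h2]
      exact ih s htail

-- SHIFT: prepending x to the original list adds 1 to every index of a value ≠ x;
-- the loop computes the same step count when last_index is shifted by 1 as well.
theorem paLoop_shift (x : Int) (xs : List Int) : ∀ (vs : List Int) (li s : Int),
    (∀ v ∈ vs, v ≠ x) → 1 ≤ li →
    paLoop (x :: xs) vs s (li + 1) = paLoop xs vs s li := by
  intro vs
  induction vs with
  | nil => intro li s _ _; simp [paLoop]
  | cons v vs ih =>
    intro li s h hli
    have hvx : x ≠ v := fun he => (h v (by simp)) he.symm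
    have htail : ∀ w ∈ vs, w ≠ x := fun w hw => h w (by simp [hw])
    simp only [paLoop]
    rw [PySem.List.index?_cons_of_ne xs hvx]
    cases hidx : PySem.List.index? xs v with
    | none => exact rfl
    | some j =>
      simp only [Option.map_some]
      by_cases hj0 : j = 0
      · subst hj0
        have hL : (0 : Int) < ((0+1 : Nat) : Int) ∧ ((0+1 : Nat) : Int) < li + 1 := by
          omega
        rw [if_pos hL]
        have hR1 : ¬ ((0:Int) < ((0:Nat) : Int) ∧ ((0:Nat) : Int) < li) := by omega
        rw [if_neg hR1, if_pos (by omega : (((0:Nat) : Int) = 0))]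
        have hc : ((0+1 : Nat) : Int) = 1 := by omega
        rw [hc]
        exact paLoop_dead x xs vs (s+1) htail
      · by_cases hacc : (j : Int) < li
        · have hL : (0 : Int) < ((j+1 : Nat) : Int) ∧ ((j+1 : Nat) : Int) < li + 1 := by
            omega
          have hR : (0 : Int) < ((j : Nat) : Int) ∧ ((j : Nat) : Int) < li := by
            omega
          rw [if_pos hL, if_pos hR]
          have hcast : ((j+1 : Nat) : Int) = ((j : Nat) : Int) + 1 := by omega
          rw [hcast]
          exact ih ((j : Nat) : Int) (s+1) htail (by omega)
        · have hL1 : ¬ ((0 : Int) < ((j+1 : Nat) : Int) ∧ ((j+1 : Nat) : Int) < li + 1) := by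
            omega
          have hL2 : ¬ (((j+1 : Nat) : Int) = 0) := by omega
          have hR1 : ¬ ((0 : Int) < ((j : Nat) : Int) ∧ ((j : Nat) : Int) < li) := by
            omega
          have hR2 : ¬ (((j : Nat) : Int) = 0) := by omega
          rw [if_neg hL1, if_neg hL2, if_neg hR1, if_neg hR2]
          exact ih li s htail hli

-- SPLIT: a block of values whose first index is positive never breaks; the value y at index 0 then adds 1 and stops.
theorem paLoop_split (o : List Int) (y : Int) (r' : List Int)
    (hy : PySem.List.index? o y = some 0) :
    ∀ (p : List Int) (li s : Int),
    (∀ v ∈ p, ∃ i : Nat, PySem.List.index? o v = some i ∧ 0 < i) →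
    paLoop o (p ++ y :: r') s li = paLoop o p s li + 1 := by
  intro p
  induction p with
  | nil =>
    intro li s _
    simp only [List.nil_append, paLoop, hy]
    have h1 : ¬ ((0:Int) < ((0:Nat) : Int) ∧ ((0:Nat) : Int) < li) := by omega
    rw [if_neg h1, if_pos (by omega : (((0:Nat) : Int) = 0))]
  | cons v p ih =>
    intro li s h
    obtain ⟨i, hi, hipos⟩ := h v (by simp)
    have htail : ∀ w ∈ p, ∃ i : Nat, PySem.List.index? o w = some i ∧ 0 < i :=
      fun w hw => h w (by simp [hw])
    simp only [List.cons_append, paLoop, hi]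
    by_cases hacc : (0:Int) < (i : Int) ∧ (i : Int) < li
    · rw [if_pos hacc, if_pos hacc]; exact ih ((i : Nat) : Int) (s+1) htail
    · have h2 : ¬ ((i : Int) = 0) := by omega
      rw [if_neg hacc, if_neg h2, if_neg hacc, if_neg h2]
      exact ih li s htail

-- on a descending list, takeWhile (x < ·) keeps exactly the elements above x
theorem takeWhile_eq_filter_desc (x : Int) : ∀ (l : List Int),
    l.Pairwise (fun a b => b ≤ a) →
    l.takeWhile (fun v => decide (x < v)) = l.filter (fun v => decide (x < v)) := by
  intro l
  induction l with
  | nil => intro _; rfl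
  | cons a l ih =>
    intro hp
    rw [List.pairwise_cons] at hp
    by_cases ha : x < a
    · simp [ha, ih hp.2]
    · have hnil : l.filter (fun v => decide (x < v)) = [] := by
        rw [List.filter_eq_nil_iff]
        intro b hb
        have hba : b ≤ a := hp.1 b hb
        simp; omega
      simp [ha, hnil]

-- MAIN INVARIANT: scanning (in descending order) the values of l that lie above the
-- threshold t, with last_index = len(l)+1, counts exactly the strict prefix maxima of l above t.
theorem paLoop_main : ∀ (l : List Int) (t : Option Int) (vs : List Int),
    vs.Perm (l.filter (fun v => gtO t v)) →
    vs.Pairwise (fun a b => b ≤ a) →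
    paLoop l vs 0 ((l.length : Int) + 1) = pbLoop l t 0 := by
  intro l
  induction l with
  | nil =>
    intro t vs hperm _
    have hnil : vs = [] := List.Perm.eq_nil (by simpa using hperm)
    subst hnil
    simp [paLoop, pbLoop]
  | cons x xs ih =>
    intro t vs hperm hsort
    by_cases hgt : gtO t x = true
    · -- x is above the threshold: the scan reaches x at index 0 and breaks there
      have hfil : (x :: xs).filter (fun v => gtO t v) = x :: xs.filter (fun v => gtO t v) := by
        simp [hgt]
      have hxvs : x ∈ vs := hperm.mem_iff.2 (by rw [hfil]; simp)
      have hvs_split : vs = vs.takeWhile (fun v => decide (x < v)) ++ vs.dropWhile (fun v => decide (x < v)) :=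
        List.takeWhile_append_dropWhile.symm
      have hpmem : ∀ v ∈ vs.takeWhile (fun v => decide (x < v)), x < v := by
        intro v hv
        simpa using List.mem_takeWhile_imp hv
      have hxr : x ∈ vs.dropWhile (fun v => decide (x < v)) := by
        rcases List.mem_append.1 (hvs_split ▸ hxvs) with h | h
        · exact absurd (hpmem x h) (lt_irrefl x)
        · exact h
      obtain ⟨y, r', hry⟩ : ∃ y r', vs.dropWhile (fun v => decide (x < v)) = y :: r' := by
        cases hl : vs.dropWhile (fun v => decide (x < v)) with
        | nil => rw [hl] at hxr; simp at hxr
        | cons y r' => exact ⟨y, r', rfl⟩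
      have hsort2 := hsort
      rw [hvs_split, hry] at hsort2
      have hyx : y = x := by
        have hhead : ¬ (x < y) := by
          have h0 := List.head?_dropWhile_not (fun v => decide (x < v)) vs
          rw [hry] at h0
          simpa using h0
        rcases List.mem_cons.1 (hry ▸ hxr) with h | h
        · exact h.symm
        · have h1 : x ≤ y := by
            have hp2 := (List.pairwise_append.1 hsort2).2.1
            rw [List.pairwise_cons] at hp2
            exact hp2.1 x h
          omega
      have hry' : vs.dropWhile (fun v => decide (x < v)) = x :: r' := by rw [hry, hyx]
      -- the takeWhile prefix is exactly the values of xs above x (in descending order)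
      have hpfil : vs.takeWhile (fun v => decide (x < v)) = vs.filter (fun v => decide (x < v)) :=
        takeWhile_eq_filter_desc x vs hsort
      have hEq : ((x :: xs).filter (fun v => gtO t v)).filter (fun v => decide (x < v))
          = xs.filter (fun v => gtO (some x) v) := by
        rw [hfil, List.filter_cons]
        rw [show (decide (x < x)) = false by simp]
        simp only [Bool.false_eq_true, if_false]
        rw [List.filter_filter]
        refine List.filter_congr ?_
        intro v _
        cases t with
        | none => simp [gtO]
        | some c =>
          have hcx : c < x := by simpa [gtO] using hgt
          simp only [gtO]
          by_cases hxv : x < v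
          · simp [hxv, show c < v by omega]
          · simp [hxv]
      have hpperm : (vs.takeWhile (fun v => decide (x < v))).Perm
          (xs.filter (fun v => gtO (some x) v)) := by
        rw [hpfil, ← hEq]; exact hperm.filter _
      have hpsort : (vs.takeWhile (fun v => decide (x < v))).Pairwise (fun a b : Int => b ≤ a) :=
        hsort.sublist (List.takeWhile_sublist _)
      have hpsmall : ∀ v ∈ vs.takeWhile (fun v => decide (x < v)),
          ∃ i : Nat, PySem.List.index? (x :: xs) v = some i ∧ 0 < i := by
        intro v hv
        have hne : x ≠ v := fun he => absurd (he ▸ hpmem v hv) (lt_irrefl x)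
        have hvxs : v ∈ xs := (List.mem_filter.1 (hpperm.mem_iff.1 hv)).1
        obtain ⟨j, hj⟩ := Option.isSome_iff_exists.1 ((PySem.List.index?_isSome_iff xs v).2 hvxs)
        refine ⟨j + 1, ?_, by omega⟩
        rw [PySem.List.index?_cons_of_ne xs hne, hj]
        rfl
      have hne' : ∀ v ∈ vs.takeWhile (fun v => decide (x < v)), v ≠ x :=
        fun v hv he => absurd (he ▸ hpmem v hv) (lt_irrefl x)
      -- split off the break at x, shift the prefix run into xs, apply the IH at threshold x
      rw [hvs_split, hry']
      rw [paLoop_split (x :: xs) x r' (PySem.List.index?_cons_self x xs) _ _ 0 hpsmall]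
      rw [show (((x :: xs).length : Int) + 1) = (((xs.length : Int) + 1) + 1) by
        rw [List.length_cons]; omega]
      rw [paLoop_shift x xs _ ((xs.length : Int) + 1) 0 hne' (by omega)]
      rw [ih (some x) _ hpperm hpsort]
      cases t with
      | none => simp only [pbLoop]; rw [pbLoop_acc xs (some x) (0+1)]; ring
      | some c =>
        have hcx : c < x := by simpa [gtO] using hgt
        simp only [pbLoop, if_pos hcx]
        rw [pbLoop_acc xs (some x) (0+1)]; ring
    · -- x is not above the threshold: it is invisible to both loops
      have hgt' : gtO t x = false := by simpa using hgt
      have hfil : (x :: xs).filter (fun v => gtO t v) = xs.filter (fun v => gtO t v) := by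
        simp [hgt']
      have hne : ∀ v ∈ vs, v ≠ x := by
        intro v hv he
        have hm := (List.mem_filter.1 (hperm.mem_iff.mp hv)).2
        rw [he] at hm
        simp [hgt'] at hm
      rw [show (((x :: xs).length : Int) + 1) = (((xs.length : Int) + 1) + 1) by
        rw [List.length_cons]; omega]
      rw [paLoop_shift x xs vs ((xs.length : Int) + 1) 0 hne (by omega)]
      rw [ih t vs (hfil ▸ hperm) hsort]
      cases t with
      | none => simp [gtO] at hgt'
      | some c =>
        have hcx : ¬ (c < x) := by simpa [gtO] using hgt'
        simp [pbLoop, hcx]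

-- ===== VERDICT (by name: the statement is the Claim_ definition above) =====
theorem gamingArray2_spec : Claim_equal_gamingArray2 := by
  intro arr _
  unfold Spec_gamingArray2
  have hperm : ((PySem.List.sorted arr (fun x => x) false).reverse).Perm
      (arr.filter (fun v => gtO none v)) := by
    rw [show arr.filter (fun v => gtO none v) = arr by simp [gtO]]
    exact (List.reverse_perm _).trans (PySem.List.sorted_perm arr _ false)
  have hsort : ((PySem.List.sorted arr (fun x => x) false).reverse).Pairwise
      (fun a b : Int => b ≤ a) := by
    rw [List.pairwise_reverse]
    exact PySem.List.sorted_pairwise arr (fun x => x)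
  have hmain := paLoop_main arr none _ hperm hsort
  simp only [gamingArray2, gamingArray2_alt, hmain]
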